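-- pv_equiv track=rewrite | github.com/weeklyweights-a11y/Context-engine | backend/app/services/csv_service.py | detect_customer_columns
-- ===== SOURCE A (Python) =====
-- CUSTOMER_HEADER_MAP: dict[str, list[str]] = {
--     "company_name": [
--         "company", "company_name", "customer", "organization", "org",
--         "account", "name",
--     ],
--     "customer_id_external": ["id", "customer_id", "account_id", "external_id"],
--     "segment": ["segment", "tier", "type", "plan_type", "customer_type"],
--     "plan": ["plan", "plan_name", "subscription", "product"],
--     "mrr": ["mrr", "monthly_revenue", "monthly"],
--     "arr": ["arr", "annual_revenue", "annual", "revenue"],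
--     "account_manager": ["manager", "account_manager", "owner", "csm", "am"],
--     "renewal_date": ["renewal", "renewal_date", "contract_end", "expiry"],
--     "health_score": ["health", "health_score", "score", "nps"],
--     "industry": ["industry", "vertical", "sector"],
--     "employee_count": ["employees", "employee_count", "company_size", "size"],
-- }
--
-- def _match_header(our_field: str, headers: list[str], mapping: dict[str, list[str]]) -> str | None:
--     """Match CSV header to our field using keyword mapping. Case-insensitive.
--     Tries exact match first, then partial (header contains keyword or keyword in header words).
--     """
--     keywords = mapping.get(our_field, [])
--     keywords_lower = {k.lower() for k in keywords}
--     for h in headers: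
--         if not h:
--             continue
--         h_clean = h.strip().lower()
--         if h_clean in keywords_lower:
--             return h.strip()
--         # Partial match: header contains keyword, or any header word matches a keyword
--         for kw in keywords_lower:
--             if kw in h_clean:
--                 return h.strip()
--         words = h_clean.replace("-", " ").replace("_", " ").split()
--         if any(w in keywords_lower for w in words):
--             return h.strip()
--     return None
--
-- def detect_customer_columns(headers: list[str]) -> dict[str, str | None]:
--     """Auto-map CSV headers to customer fields. Returns dict of our_field -> csv_column."""
--     result: dict[str, str | None] = {}
--     for our_field in CUSTOMER_HEADER_MAP:
--         matched = _match_header(our_field, headers, CUSTOMER_HEADER_MAP)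
--         result[our_field] = matched
--     # Fallback: use first column for company_name if nothing matched
--     first = next((h.strip() for h in headers if h and h.strip()), None)
--     if first and not result.get("company_name"):
--         result["company_name"] = first
--     return result
-- ===== SOURCE B (Python) =====
-- CUSTOMER_HEADER_MAP: dict[str, list[str]] = {
--     "company_name": [
--         "company", "company_name", "customer", "organization", "org",
--         "account", "name",
--     ],
--     "customer_id_external": ["id", "customer_id", "account_id", "external_id"],
--     "segment": ["segment", "tier", "type", "plan_type", "customer_type"],
--     "plan": ["plan", "plan_name", "subscription", "product"],
--     "mrr": ["mrr", "monthly_revenue", "monthly"],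
--     "arr": ["arr", "annual_revenue", "annual", "revenue"],
--     "account_manager": ["manager", "account_manager", "owner", "csm", "am"],
--     "renewal_date": ["renewal", "renewal_date", "contract_end", "expiry"],
--     "health_score": ["health", "health_score", "score", "nps"],
--     "industry": ["industry", "vertical", "sector"],
--     "employee_count": ["employees", "employee_count", "company_size", "size"],
-- }
--
--
-- def detect_customer_columns(headers: list[str]) -> dict[str, str | None]:
--     """Auto-map CSV headers to customer fields in ONE sweep over the headers.
--
--     A field is matched by the first header whose cleaned form contains one of the
--     field's keywords as a substring, or one of whose dash/underscore-split words
--     equals a keyword (the keywords are already lowercase).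
--     """
--     state = [(field, kws, None) for field, kws in CUSTOMER_HEADER_MAP.items()]
--     for h in headers:
--         if not h:
--             continue
--         h_stripped = h.strip()
--         h_clean = h_stripped.lower()
--         words = set(h_clean.replace("-", " ").replace("_", " ").split())
--         state = [
--             (f, kws,
--              h_stripped if v is None and any(kw in h_clean or kw in words for kw in kws) else v)
--             for f, kws, v in state
--         ]
--     result = {f: v for f, _, v in state}
--     if result["company_name"] is None:
--         first = next((h.strip() for h in headers if h and h.strip()), None)
--         if first:
--             result["company_name"] = first
--     return result
-- ===== Notes on version B (the rewrite author's own statement) =====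
-- stated objective: alternative
-- what changed: Replaces the per-field scan of all headers (restarted for each of the 11 fields, with a redundant exact-match pre-check) by a single in-order sweep over the headers that maintains the still-unassigned fields, matching with the substring test alone (which subsumes the exact test).
import Mathlib
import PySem

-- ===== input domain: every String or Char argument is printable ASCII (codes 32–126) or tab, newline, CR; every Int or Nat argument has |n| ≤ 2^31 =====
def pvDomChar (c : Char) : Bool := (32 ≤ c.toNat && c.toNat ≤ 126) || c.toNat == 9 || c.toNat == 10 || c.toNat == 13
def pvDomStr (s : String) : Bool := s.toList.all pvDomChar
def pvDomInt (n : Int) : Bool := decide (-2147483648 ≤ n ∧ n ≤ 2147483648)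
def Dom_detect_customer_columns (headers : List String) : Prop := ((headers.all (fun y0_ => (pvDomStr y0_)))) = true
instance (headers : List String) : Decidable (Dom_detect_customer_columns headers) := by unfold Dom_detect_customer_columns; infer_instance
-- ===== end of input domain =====

-- ===== PORT A =====
-- B makes one sweep over the headers maintaining the unassigned fields, instead of A's
-- restarted header scan per field; same return value (alternative decomposition, no speed claim).

def pvHeaderPairs : List (String × List String) :=
  [("company_name", ["company", "company_name", "customer", "organization", "org", "account", "name"]),
   ("customer_id_external", ["id", "customer_id", "account_id", "external_id"]),
   ("segment", ["segment", "tier", "type", "plan_type", "customer_type"]),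
   ("plan", ["plan", "plan_name", "subscription", "product"]),
   ("mrr", ["mrr", "monthly_revenue", "monthly"]),
   ("arr", ["arr", "annual_revenue", "annual", "revenue"]),
   ("account_manager", ["manager", "account_manager", "owner", "csm", "am"]),
   ("renewal_date", ["renewal", "renewal_date", "contract_end", "expiry"]),
   ("health_score", ["health", "health_score", "score", "nps"]),
   ("industry", ["industry", "vertical", "sector"]),
   ("employee_count", ["employees", "employee_count", "company_size", "size"])]

def CUSTOMER_HEADER_MAP : PySem.Dict String (List String) := PySem.Dict.ofList pvHeaderPairs

-- the loop body of A's _match_header (return = some, continue = recurse)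
def pvMatchHeaderGo (kwl : PySem.Set String) : List String → Option String
  | [] => none
  | h :: t =>
    if h = "" then pvMatchHeaderGo kwl t
    else
      let hc := PySem.Str.lower (PySem.Str.strip h)
      if PySem.Set.contains kwl hc then some (PySem.Str.strip h)
      else if kwl.any (fun kw => PySem.Str.isIn kw hc) then some (PySem.Str.strip h)
      else if (PySem.Str.split₀ (PySem.Str.replace (PySem.Str.replace hc "-" " ") "_" " ")).any
                (fun w => PySem.Set.contains kwl w) then some (PySem.Str.strip h)
      else pvMatchHeaderGo kwl t

def pvMatchHeader (our_field : String) (headers : List String)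
    (mapping : PySem.Dict String (List String)) : Option String :=
  let keywords := mapping.getD our_field []
  let keywords_lower : PySem.Set String := PySem.Set.ofList (keywords.map PySem.Str.lower)
  pvMatchHeaderGo keywords_lower headers

-- next((h.strip() for h in headers if h and h.strip()), None)
def pvFirstA : List String → Option String
  | [] => none
  | h :: t =>
    if h = "" then pvFirstA t
    else if PySem.Str.strip h = "" then pvFirstA t
    else some (PySem.Str.strip h)

def detect_customer_columns (headers : List String) : List (String × Option String) :=
  let result : PySem.Dict String (Option String) :=
    CUSTOMER_HEADER_MAP.keys.foldl
      (fun d our_field => d.insert our_field (pvMatchHeader our_field headers CUSTOMER_HEADER_MAP))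
      PySem.Dict.empty
  let first := pvFirstA headers
  let result2 :=
    match first with
    | none => result
    | some f =>
      if f ≠ "" ∧ (result.getD "company_name" none).getD "" = "" then
        result.insert "company_name" (some f)
      else result
  result2.items

-- ===== PORT B =====

-- one header applied to the sweep state (field, keywords, assigned-or-None)
def pvSweepStep (st : List (String × List String × Option String)) (h : String) :
    List (String × List String × Option String) :=
  if h = "" then st
  else
    let h_stripped := PySem.Str.strip h
    let h_clean := PySem.Str.lower h_stripped
    let words : PySem.Set String :=
      PySem.Set.ofList (PySem.Str.split₀ (PySem.Str.replace (PySem.Str.replace h_clean "-" " ") "_" " "))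
    st.map (fun e =>
      (e.1, e.2.1,
        if e.2.2 = none ∧ (e.2.1.any (fun kw => PySem.Str.isIn kw h_clean || PySem.Set.contains words kw)) then
          some h_stripped
        else e.2.2))

def pvFirstB : List String → Option String
  | [] => none
  | h :: t =>
    if h = "" then pvFirstB t
    else if PySem.Str.strip h = "" then pvFirstB t
    else some (PySem.Str.strip h)

def detect_customer_columns_alt (headers : List String) : List (String × Option String) :=
  let state0 : List (String × List String × Option String) :=
    pvHeaderPairs.map (fun p => (p.1, p.2, none))
  let state := headers.foldl pvSweepStep state0
  let result : PySem.Dict String (Option String) :=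
    PySem.Dict.ofList (state.map (fun e => (e.1, e.2.2)))
  let result2 :=
    if result.getD "company_name" none = none then
      match pvFirstB headers with
      | none => result
      | some f => if f = "" then result else result.insert "company_name" (some f)
    else result
  result2.items

-- ===== PRECONDITION & SPEC =====
def Spec_detect_customer_columns (headers : List String) (out : List (String × Option String)) : Prop := out = detect_customer_columns_alt headers
instance (headers : List String) (out : List (String × Option String)) : Decidable (Spec_detect_customer_columns headers out) := by unfold Spec_detect_customer_columns; infer_instance

-- ===== CLAIM (what is proved, stated in full; the proofs are below) =====
def Claim_equal_detect_customer_columns : Prop := ∀ (headers : List String), Dom_detect_customer_columns headers → Spec_detect_customer_columns headers (detect_customer_columns headers)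

-- ===== LEMMAS AND PROOFS =====

-- the per-field "first matching header" that both programs compute
def pvFM (kws : List String) : List String → Option String
  | [] => none
  | h :: t =>
    let hc := PySem.Str.lower (PySem.Str.strip h)
    if h ≠ "" ∧ (kws.any (fun kw => PySem.Str.isIn kw hc ||
          PySem.Set.contains (PySem.Set.ofList (PySem.Str.split₀ (PySem.Str.replace (PySem.Str.replace hc "-" " ") "_" " "))) kw)) then
      some (PySem.Str.strip h)
    else pvFM kws t

-- A's three-way test equals B's two-way test (the exact match is a substring match)
lemma pvCond_eq (kws : List String) (hc : String) :
    (PySem.Set.contains (PySem.Set.ofList kws) hc ||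
     (PySem.Set.ofList kws).any (fun kw => PySem.Str.isIn kw hc) ||
     (PySem.Str.split₀ (PySem.Str.replace (PySem.Str.replace hc "-" " ") "_" " ")).any
       (fun w => PySem.Set.contains (PySem.Set.ofList kws) w)) =
    (kws.any (fun kw => PySem.Str.isIn kw hc ||
       PySem.Set.contains (PySem.Set.ofList (PySem.Str.split₀ (PySem.Str.replace (PySem.Str.replace hc "-" " ") "_" " "))) kw)) := by
  apply Bool.eq_iff_iff.mpr
  simp only [Bool.or_eq_true, List.any_eq_true, PySem.Set.contains, List.contains_iff_mem,
    PySem.Set.mem_ofList]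
  constructor
  · rintro ((h1 | ⟨kw, hkw, hin⟩) | ⟨w, hw, hmem⟩)
    · exact ⟨hc, h1, Or.inl ((PySem.Str.isIn_iff_infix hc hc).mpr (List.infix_refl _))⟩
    · exact ⟨kw, hkw, Or.inl hin⟩
    · exact ⟨w, hmem, Or.inr hw⟩
  · rintro ⟨kw, hkw, hin | hw⟩
    · exact Or.inl (Or.inr ⟨kw, hkw, hin⟩)
    · exact Or.inr ⟨kw, hw, hkw⟩

lemma pvGo_eq_FM (kws : List String) (hs : List String) :
    pvMatchHeaderGo (PySem.Set.ofList kws) hs = pvFM kws hs := by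
  induction hs with
  | nil => rfl
  | cons h t ih =>
    by_cases hh : h = ""
    · simp only [pvMatchHeaderGo, pvFM, ih, hh]
      simp
    · simp only [pvMatchHeaderGo, pvFM, if_neg hh]
      rw [← pvCond_eq kws (PySem.Str.lower (PySem.Str.strip h))]
      rcases Bool.eq_false_or_eq_true
          (PySem.Set.contains (PySem.Set.ofList kws) (PySem.Str.lower (PySem.Str.strip h))) with h1 | h1 <;>
      rcases Bool.eq_false_or_eq_true
          ((PySem.Set.ofList kws).any (fun kw => PySem.Str.isIn kw (PySem.Str.lower (PySem.Str.strip h)))) with h2 | h2 <;>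
      rcases Bool.eq_false_or_eq_true
          ((PySem.Str.split₀ (PySem.Str.replace (PySem.Str.replace (PySem.Str.lower (PySem.Str.strip h)) "-" " ") "_" " ")).any
            (fun w => PySem.Set.contains (PySem.Set.ofList kws) w)) with h3 | h3 <;>
      rw [h1, h2, h3] <;> simp [hh, ih]

-- the sweep computes, for every field, its first matching header
lemma pvSweep_inv (hs : List String) (pairs : List (String × List String))
    (r : String × List String → Option String) :
    hs.foldl pvSweepStep (pairs.map (fun p => (p.1, p.2, r p))) =
      pairs.map (fun p => (p.1, p.2, (r p).or (pvFM p.2 hs))) := by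
  induction hs generalizing r with
  | nil => simp [pvFM]
  | cons h t ih =>
    rw [List.foldl_cons]
    by_cases hh : h = ""
    · rw [show pvSweepStep (pairs.map fun p => (p.1, p.2, r p)) h
            = pairs.map fun p => (p.1, p.2, r p) from by simp [pvSweepStep, hh]]
      rw [ih r]
      refine List.map_congr_left (fun p hp => ?_)
      simp [pvFM, hh]
    · rw [show pvSweepStep (pairs.map fun p => (p.1, p.2, r p)) h
            = pairs.map (fun p => (p.1, p.2,
                if r p = none ∧ (p.2.any (fun kw =>
                    PySem.Str.isIn kw (PySem.Str.lower (PySem.Str.strip h)) ||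
                    PySem.Set.contains (PySem.Set.ofList (PySem.Str.split₀ (PySem.Str.replace
                      (PySem.Str.replace (PySem.Str.lower (PySem.Str.strip h)) "-" " ") "_" " "))) kw)) = true then
                  some (PySem.Str.strip h)
                else r p)) from by
        simp only [pvSweepStep, if_neg hh, List.map_map]; rfl]
      rw [ih _]
      refine List.map_congr_left (fun p hp => ?_)
      simp only [pvFM]
      cases hr : r p with
      | some v => simp
      | none =>
        rcases Bool.eq_false_or_eq_true (p.2.any (fun kw =>
            PySem.Str.isIn kw (PySem.Str.lower (PySem.Str.strip h)) ||
            PySem.Set.contains (PySem.Set.ofList (PySem.Str.split₀ (PySem.Str.replace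
              (PySem.Str.replace (PySem.Str.lower (PySem.Str.strip h)) "-" " ") "_" " "))) kw)) with hc | hc <;>
          rw [hc] <;> simp [hh]

lemma pvFM_ne_empty (kws : List String) (hk : "" ∉ kws) (hs : List String) (s : String)
    (h : pvFM kws hs = some s) : s ≠ "" := by
  induction hs with
  | nil => simp [pvFM] at h
  | cons x t ih =>
    rw [pvFM] at h
    split_ifs at h with hcond
    · obtain ⟨hx, hany⟩ := hcond
      obtain rfl : s = PySem.Str.strip x := (Option.some_inj.mp h).symm
      intro hs0
      rw [hs0] at hany
      simp only [List.any_eq_true, Bool.or_eq_true] at hany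
      obtain ⟨kw, hkw, hor⟩ := hany
      have hkwne : kw ≠ "" := fun he => hk (he ▸ hkw)
      rcases hor with hin | hw
      · have h1 : kw.toList <:+: (PySem.Str.lower "").toList := (PySem.Str.isIn_iff_infix _ _).mp hin
        have h1' : kw.toList <:+: ([] : List Char) := by
          simpa [show PySem.Chars.lower ([] : List Char) = ([] : List Char) from rfl] using h1
        have h2 : kw.toList = [] := List.infix_nil.mp h1' 
        exact hkwne (by have := String.toList_inj (s₁ := kw) (s₂ := ""); simp_all)
      · have he : PySem.Set.ofList (PySem.Str.split₀ (PySem.Str.replace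
            (PySem.Str.replace (PySem.Str.lower "") "-" " ") "_" " ")) = ([] : List String) := by decide
        rw [he] at hw
        simp [PySem.Set.contains] at hw
    · exact ih h

lemma pvFirstA_eq_B (hs : List String) : pvFirstA hs = pvFirstB hs := by
  induction hs with
  | nil => rfl
  | cons h t ih => simp only [pvFirstA, pvFirstB, ih]

lemma pvFirstA_ne_empty (hs : List String) (s : String) (h : pvFirstA hs = some s) : s ≠ "" := by
  induction hs with
  | nil => simp [pvFirstA] at h
  | cons x t ih =>
    simp only [pvFirstA] at h
    split_ifs at h with h1 h2
    · exact ih h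
    · exact ih h
    · cases h; exact h2

-- ===== VERDICT (by name: the statement is the Claim_ definition above) =====
theorem detect_customer_columns_spec : Claim_equal_detect_customer_columns := by
  unfold Claim_equal_detect_customer_columns Spec_detect_customer_columns
  intro headers _
  have hfacts : ∀ p ∈ pvHeaderPairs,
      CUSTOMER_HEADER_MAP.getD p.1 [] = p.2 ∧ p.2.map PySem.Str.lower = p.2 := by decide
  -- A's field loop builds exactly the per-field first-match table
  have hA : (CUSTOMER_HEADER_MAP.keys.foldl
        (fun d our_field => d.insert our_field (pvMatchHeader our_field headers CUSTOMER_HEADER_MAP))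
        PySem.Dict.empty).items
      = pvHeaderPairs.map (fun p => (p.1, pvFM p.2 headers)) := by
    have h0 := PySem.Dict.items_foldl_insert_fresh (k := fun (a : String) => a)
      (v := fun a => pvMatchHeader a headers CUSTOMER_HEADER_MAP)
      CUSTOMER_HEADER_MAP.keys PySem.Dict.empty
      (fun a _ => PySem.Dict.contains_empty a) (by decide)
    refine Eq.trans h0 ?_
    rw [show CUSTOMER_HEADER_MAP.keys = pvHeaderPairs.map Prod.fst from by decide, List.map_map]
    rw [show (PySem.Dict.empty : PySem.Dict String (Option String)).items = [] from rfl, List.nil_append]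
    refine List.map_congr_left (fun p hp => ?_)
    show (p.1, pvMatchHeaderGo (PySem.Set.ofList
        ((CUSTOMER_HEADER_MAP.getD p.1 []).map PySem.Str.lower)) headers) = (p.1, pvFM p.2 headers)
    rw [(hfacts p hp).1, (hfacts p hp).2, pvGo_eq_FM]
  -- B's sweep builds the same table
  have hstate : headers.foldl pvSweepStep (pvHeaderPairs.map (fun p => (p.1, p.2, none)))
      = pvHeaderPairs.map (fun p => (p.1, p.2, pvFM p.2 headers)) := by
    have := pvSweep_inv headers pvHeaderPairs (fun _ => none)
    simpa using this
  have hB : (PySem.Dict.ofList ((headers.foldl pvSweepStep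
        (pvHeaderPairs.map (fun p => (p.1, p.2, none)))).map (fun e => (e.1, e.2.2)))).items
      = pvHeaderPairs.map (fun p => (p.1, pvFM p.2 headers)) := by
    rw [hstate, List.map_map]
    have h0 := PySem.Dict.items_foldl_insert_fresh (k := fun (q : String × Option String) => q.1)
      (v := fun q => q.2)
      (pvHeaderPairs.map ((fun e => (e.1, e.2.2)) ∘ (fun p => (p.1, p.2, pvFM p.2 headers))))
      (PySem.Dict.empty : PySem.Dict String (Option String))
      (fun a _ => PySem.Dict.contains_empty a.1)
      (by rw [List.map_map]; exact (by decide : (pvHeaderPairs.map Prod.fst).Nodup))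
    refine Eq.trans h0 ?_
    rw [show (PySem.Dict.empty : PySem.Dict String (Option String)).items = [] from rfl, List.nil_append,
      List.map_map]
    rfl
  -- both programs hold the same dict before the fallback
  set dA := CUSTOMER_HEADER_MAP.keys.foldl
      (fun d our_field => d.insert our_field (pvMatchHeader our_field headers CUSTOMER_HEADER_MAP))
      PySem.Dict.empty with hdA
  set dB := PySem.Dict.ofList ((headers.foldl pvSweepStep
      (pvHeaderPairs.map (fun p => (p.1, p.2, none)))).map (fun e => (e.1, e.2.2))) with hdB
  have hdict : dB = dA := PySem.Dict.ext (hB.trans hA.symm)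
  have hndk : dA.keys.Nodup := by
    show (dA.items.map Prod.fst).Nodup
    rw [hA, List.map_map]
    exact (by decide : (pvHeaderPairs.map Prod.fst).Nodup)
  have hget : dA.getD "company_name" none
      = pvFM ["company", "company_name", "customer", "organization", "org", "account", "name"] headers := by
    refine PySem.Dict.getD_of_mem_items dA ?_ hndk none
    rw [hA]
    have hmem : (("company_name", ["company", "company_name", "customer", "organization", "org",
        "account", "name"]) : String × List String) ∈ pvHeaderPairs := by simp [pvHeaderPairs]
    exact List.mem_map_of_mem hmem
  show detect_customer_columns headers = detect_customer_columns_alt headers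
  simp only [detect_customer_columns, detect_customer_columns_alt, ← hdA, ← hdB, hdict, pvFirstA_eq_B]
  rw [hget]
  cases hfm : pvFM ["company", "company_name", "customer", "organization", "org", "account", "name"] headers with
  | some v =>
    have hv : v ≠ "" := pvFM_ne_empty _ (by decide) headers v hfm
    cases hfb : pvFirstB headers with
    | none => simp
    | some f => simp [hv]
  | none =>
    cases hfb : pvFirstB headers with
    | none => simp
    | some f =>
      have hf : f ≠ "" := pvFirstA_ne_empty headers f (by rw [pvFirstA_eq_B, hfb])
      simp [hf]
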